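-- pv_equiv track=rewrite | github.com/thiagopelizoni/ProjectEuler | src/problem_325.py | get_suv
-- ===== SOURCE A (Python) =====
-- from typing import Tuple
--
-- def floor_sqrt5_times_n(n: int) -> int:
--     if n == 0:
--         return 0
--     low = 0
--     high = 3 * n
--     while low < high:
--         mid = low + (high - low + 1) // 2
--         if mid * mid <= 5 * n * n:
--             low = mid
--         else:
--             high = mid - 1
--     return low
--
-- def floor_phi(n: int) -> int:
--     return (n + floor_sqrt5_times_n(n)) // 2
--
-- memo: dict[int, Tuple[int, int, int]] = {}
--
-- def get_suv(n: int) -> Tuple[int, int, int]: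
--     """
--     Purpose
--     -------
--     Compute the sums S(n) = sum_{k=1}^n floor(k * phi), U(n) = sum_{k=1}^n k * floor(k * phi),
--     V(n) = sum_{k=1}^n floor(k * phi)^2 where phi = (1 + sqrt(5))/2.
--
--     Args
--     ----
--     None
--
--     Returns
--     -------
--     None
--
--     Method / Math Rationale
--     -----------------------
--     Uses recursive Beatty partition of natural numbers into Wythoff sequences A and B.
--     S(n) = N(N+1)/2 - S(J) - J(J+1)/2
--     V(n) = N(N+1)(2N+1)/6 - V(J) - 2 U(J) - J(J+1)(2J+1)/6
--     U(n) = [n(n+1)/2] * (n + J) - [n(n+1)(n-1)/3 + V(J) + S(J)] / 2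
--     where N = floor(n * phi), J = N - n.
--     Floor computed via binary search for floor(n * sqrt(5)).
--
--     Complexity
--     ----------
--     O(log n)
--
--     References
--     ----------
--     https://projecteuler.net/problem=325
--     """
--     if n <= 0:
--         return 0, 0, 0
--     if n in memo:
--         return memo[n]
--     N = floor_phi(n)
--     J = N - n
--     sj, uj, vj = get_suv(J)
--     s = N * (N + 1) // 2 - sj - J * (J + 1) // 2
--     v = N * (N + 1) * (2 * N + 1) // 6 - vj - 2 * uj - J * (J + 1) * (2 * J + 1) // 6
--     an = n + J
--     temp = n * (n + 1) * (n - 1) // 3 + vj + sj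
--     u = n * (n + 1) // 2 * an - temp // 2
--     memo[n] = s, u, v
--     return s, u, v
-- ===== SOURCE B (Python) =====
-- from typing import Tuple
--
--
-- def _isqrt(x: int) -> int:
--     # Newton's method integer square root (floor).
--     if x == 0:
--         return 0
--     r = x
--     while True:
--         t = (r + x // r) // 2
--         if t >= r:
--             return r
--         r = t
--
--
-- def get_suv(n: int) -> Tuple[int, int, int]:
--     # Iterative version: descend n -> J pushing frames, then fold back up.
--     frames = []
--     m = n
--     while m > 0:
--         N = (m + _isqrt(5 * m * m)) // 2
--         J = N - m
--         frames.append((m, N, J))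
--         m = J
--     s = u = v = 0
--     for m, N, J in reversed(frames):
--         s2 = N * (N + 1) // 2 - s - J * (J + 1) // 2
--         v2 = N * (N + 1) * (2 * N + 1) // 6 - v - 2 * u - J * (J + 1) * (2 * J + 1) // 6
--         temp = m * (m + 1) * (m - 1) // 3 + v + s
--         u2 = m * (m + 1) // 2 * (m + J) - temp // 2
--         s, u, v = s2, u2, v2
--     return s, u, v
-- ===== Notes on version B (the rewrite author's own statement) =====
-- stated objective: alternative
-- what changed: Replaced the recursive memoized get_suv by an explicit descent loop pushing (m, N, J) frames plus a bottom-up fold over the reversed frames, and replaced the binary-search floor-sqrt helper by a Newton-iteration integer square root.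
import Mathlib
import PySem

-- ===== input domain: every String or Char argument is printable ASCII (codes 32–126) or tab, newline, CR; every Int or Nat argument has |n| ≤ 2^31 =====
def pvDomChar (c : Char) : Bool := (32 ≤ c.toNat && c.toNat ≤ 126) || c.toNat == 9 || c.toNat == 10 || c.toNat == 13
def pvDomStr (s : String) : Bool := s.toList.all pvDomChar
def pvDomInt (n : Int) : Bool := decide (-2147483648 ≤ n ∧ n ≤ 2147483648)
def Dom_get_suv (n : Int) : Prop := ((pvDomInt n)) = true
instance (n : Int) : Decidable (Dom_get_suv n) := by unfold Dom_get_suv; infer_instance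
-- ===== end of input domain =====

-- B replaces A's binary-search floor-sqrt helper by a Newton-iteration integer square root,
-- and A's memoized self-recursion by an explicit frame stack plus a bottom-up fold (objective:
-- alternative decomposition). A's global memo dict is a pure cache and does not affect the value.
-- Loops are ported as structural recursion on a fuel that provably exceeds the iteration count
-- (the sufficiency proofs are in the lemma section); fuel exhaustion is never reached.

-- ===== PORT A =====

-- the `while low < high` loop of floor_sqrt5_times_n (fuel ≥ high - low suffices: the gap shrinks each turn)
def fs5Loop (n : Int) : Nat → Int → Int → Int
  | 0, low, _ => low
  | fuel + 1, low, high =>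
    if low < high then
      let mid := low + PySem.Int.floordiv (high - low + 1) 2
      if mid * mid ≤ 5 * n * n then fs5Loop n fuel mid high
      else fs5Loop n fuel low (mid - 1)
    else low

def floor_sqrt5_times_n (n : Int) : Int :=
  if n = 0 then 0 else fs5Loop n (3 * n).toNat 0 (3 * n)

def floor_phi (n : Int) : Int :=
  PySem.Int.floordiv (n + floor_sqrt5_times_n n) 2

-- the recursion of get_suv (fuel ≥ n suffices: the argument strictly decreases)
def suvGo : Nat → Int → Int × Int × Int
  | 0, _ => (0, 0, 0)
  | fuel + 1, n =>
    if n ≤ 0 then (0, 0, 0)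
    else
      let N := floor_phi n
      let J := N - n
      let r := suvGo fuel J
      let sj := r.1
      let uj := r.2.1
      let vj := r.2.2
      let s := PySem.Int.floordiv (N * (N + 1)) 2 - sj - PySem.Int.floordiv (J * (J + 1)) 2
      let v := PySem.Int.floordiv (N * (N + 1) * (2 * N + 1)) 6 - vj - 2 * uj -
        PySem.Int.floordiv (J * (J + 1) * (2 * J + 1)) 6
      let an := n + J
      let temp := PySem.Int.floordiv (n * (n + 1) * (n - 1)) 3 + vj + sj
      let u := PySem.Int.floordiv (n * (n + 1)) 2 * an - PySem.Int.floordiv temp 2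
      (s, u, v)

def get_suv (n : Int) : Int × Int × Int := suvGo (n.toNat + 1) n

-- ===== PORT B =====

-- Newton iteration `while True: t = (r + x//r)//2; if t >= r: return r; r = t`
-- (fuel ≥ r suffices: r strictly decreases while the loop runs)
def newtonGo (x : Int) : Nat → Int → Int
  | 0, r => r
  | fuel + 1, r =>
    let t := PySem.Int.floordiv (r + PySem.Int.floordiv x r) 2
    if t < r then newtonGo x fuel t else r

-- `_isqrt` of Source B
def isqrtB (x : Int) : Int :=
  if x = 0 then 0 else newtonGo x x.toNat x

-- descent phase: the `while m > 0` loop collecting (m, N, J) frames (fuel ≥ m suffices: J < m)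
def framesGo : Nat → Int → List (Int × Int × Int)
  | 0, _ => []
  | fuel + 1, m =>
    if m > 0 then
      let N := PySem.Int.floordiv (m + isqrtB (5 * m * m)) 2
      let J := N - m
      (m, N, J) :: framesGo fuel J
    else []

-- ascent phase: one iteration of the `for … in reversed(frames)` loop
def suvStep (acc : Int × Int × Int) (f : Int × Int × Int) : Int × Int × Int :=
  let m := f.1
  let N := f.2.1
  let J := f.2.2
  let s := acc.1
  let u := acc.2.1
  let v := acc.2.2
  let s2 := PySem.Int.floordiv (N * (N + 1)) 2 - s - PySem.Int.floordiv (J * (J + 1)) 2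
  let v2 := PySem.Int.floordiv (N * (N + 1) * (2 * N + 1)) 6 - v - 2 * u -
    PySem.Int.floordiv (J * (J + 1) * (2 * J + 1)) 6
  let temp := PySem.Int.floordiv (m * (m + 1) * (m - 1)) 3 + v + s
  let u2 := PySem.Int.floordiv (m * (m + 1)) 2 * (m + J) - PySem.Int.floordiv temp 2
  (s2, u2, v2)

def get_suv_alt (n : Int) : Int × Int × Int :=
  ((framesGo (n.toNat + 1) n).reverse).foldl suvStep (0, 0, 0)

-- ===== PRECONDITION & SPEC =====
def Spec_get_suv (n : Int) (out : Int × Int × Int) : Prop := out = get_suv_alt n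
instance (n : Int) (out : Int × Int × Int) : Decidable (Spec_get_suv n out) := by unfold Spec_get_suv; infer_instance

-- ===== CLAIM (what is proved, stated in full; the proofs are below) =====
def Claim_equal_get_suv : Prop := ∀ (n : Int), Dom_get_suv n → Spec_get_suv n (get_suv n)

-- ===== LEMMAS AND PROOFS =====

-- midpoint bounds of the binary search
theorem fs5_mid_bounds (low high : Int) (h : low < high) :
    low < low + PySem.Int.floordiv (high - low + 1) 2 ∧
    low + PySem.Int.floordiv (high - low + 1) 2 ≤ high := by
  rw [PySem.Int.floordiv_eq_ediv_of_pos (by omega : (0:Int) < 2)]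
  omega

-- the binary search computes the floor square root of 5n² (given enough fuel)
theorem fs5Loop_spec (n : Int) : ∀ (fuel : Nat) (low high : Int), 0 ≤ low → low ≤ high →
    low * low ≤ 5 * n * n → 5 * n * n < (high + 1) * (high + 1) → high - low ≤ (fuel : Int) →
    0 ≤ fs5Loop n fuel low high ∧ fs5Loop n fuel low high * fs5Loop n fuel low high ≤ 5 * n * n ∧
      5 * n * n < (fs5Loop n fuel low high + 1) * (fs5Loop n fuel low high + 1) := by
  intro fuel
  induction fuel with
  | zero =>
    intro low high h0 hlh hsq hub hf
    have heq : low = high := by omega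
    rw [fs5Loop]
    exact ⟨h0, hsq, heq ▸ hub⟩
  | succ f ih =>
    intro low high h0 hlh hsq hub hf
    rw [fs5Loop]
    by_cases h : low < high
    · rw [if_pos h]
      have hb : low < low + PySem.Int.floordiv (high - low + 1) 2 ∧
          low + PySem.Int.floordiv (high - low + 1) 2 ≤ high := fs5_mid_bounds low high h
      by_cases hle : (low + PySem.Int.floordiv (high - low + 1) 2) *
          (low + PySem.Int.floordiv (high - low + 1) 2) ≤ 5 * n * n
      · rw [if_pos hle]
        exact ih _ high (by omega) (by omega) hle hub (by push_cast; omega)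
      · rw [if_neg hle]
        have hmid : 5 * n * n < (low + PySem.Int.floordiv (high - low + 1) 2) *
            (low + PySem.Int.floordiv (high - low + 1) 2) := not_le.mp hle
        exact ih low _ h0 (by omega) hsq (by nlinarith [hmid]) (by push_cast at hf ⊢; omega)
    · rw [if_neg h]
      have heq : low = high := by omega
      exact ⟨h0, hsq, heq ▸ hub⟩

-- key decrease fact for A's recursion: J = floor_phi n - n < n
theorem floor_phi_sub_lt (n : Int) (hn : 1 ≤ n) : floor_phi n - n < n := by
  have hb := fs5Loop_spec n (3 * n).toNat 0 (3 * n) le_rfl (by omega) (by nlinarith)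
    (by nlinarith) (by omega)
  have hne : ¬ n = 0 := by omega
  have hf : floor_sqrt5_times_n n = fs5Loop n (3 * n).toNat 0 (3 * n) := by
    simp [floor_sqrt5_times_n, hne]
  have hrlt : fs5Loop n (3 * n).toNat 0 (3 * n) < 3 * n := by
    by_contra hge
    push_neg at hge
    nlinarith [hb.2.1, hb.1]
  have h0 := hb.1
  unfold floor_phi
  rw [hf, PySem.Int.floordiv_eq_ediv_of_pos (by omega : (0:Int) < 2)]
  omega

-- A's fuel is irrelevant once it exceeds n
theorem suvGo_congr : ∀ (f1 f2 : Nat) (n : Int), n.toNat < f1 → n.toNat < f2 →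
    suvGo f1 n = suvGo f2 n := by
  intro f1
  induction f1 with
  | zero => intro f2 n h1; omega
  | succ g1 ih =>
    intro f2 n h1 h2
    match f2, h2 with
    | g2 + 1, _ =>
      rw [suvGo, suvGo]
      by_cases hn : n ≤ 0
      · rw [if_pos hn, if_pos hn]
      · have hJ : floor_phi n - n < n := floor_phi_sub_lt n (by omega)
        have hih : suvGo g1 (floor_phi n - n) = suvGo g2 (floor_phi n - n) :=
          ih g2 (floor_phi n - n) (by omega) (by omega)
        simp only [if_neg hn, hih]

-- one-step facts about Newton's iterate
theorem newton_t_facts (x r : Int) (hx : 1 ≤ x) (hr : 1 ≤ r) :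
    1 ≤ PySem.Int.floordiv (r + PySem.Int.floordiv x r) 2 ∧
    x < (PySem.Int.floordiv (r + PySem.Int.floordiv x r) 2 + 1) *
        (PySem.Int.floordiv (r + PySem.Int.floordiv x r) 2 + 1) ∧
    (x < r * r → PySem.Int.floordiv (r + PySem.Int.floordiv x r) 2 < r) := by
  rw [PySem.Int.floordiv_eq_ediv_of_pos (by omega : (0:Int) < r),
      PySem.Int.floordiv_eq_ediv_of_pos (by omega : (0:Int) < 2)]
  have hq1 : r * (x / r) ≤ x := by
    have := Int.emod_nonneg x (by omega : r ≠ 0)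
    have := Int.ediv_add_emod x r
    omega
  have hq2 : x < r * (x / r) + r := by
    have := Int.emod_lt_of_pos x (by omega : (0:Int) < r)
    have := Int.ediv_add_emod x r
    omega
  have hq0 : 0 ≤ x / r := Int.ediv_nonneg (by omega) (by omega)
  set q := x / r with hq
  have ht1 : 2 * ((r + q) / 2) ≤ r + q := by
    have := Int.emod_nonneg (r + q) (by omega : (2:Int) ≠ 0)
    have := Int.ediv_add_emod (r + q) 2
    omega
  have ht2 : r + q ≤ 2 * ((r + q) / 2) + 1 := by
    have := Int.emod_lt_of_pos (r + q) (by omega : (0:Int) < 2)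
    have := Int.ediv_add_emod (r + q) 2
    omega
  set t := (r + q) / 2 with ht
  have hub : x < (t + 1) * (t + 1) := by
    nlinarith [sq_nonneg (r - q - 1), sq_nonneg (r + q + 1 - 2 * (t + 1))]
  refine ⟨?_, hub, ?_⟩
  · nlinarith [hub]
  · intro hlt
    have hqr : q < r := by
      by_contra hge
      push_neg at hge
      nlinarith
    omega

-- the Newton loop computes the floor square root of x (given enough fuel)
theorem newtonGo_spec (x : Int) (hx : 1 ≤ x) : ∀ (fuel : Nat) (r : Int),
    1 ≤ r → x < (r + 1) * (r + 1) → r ≤ (fuel : Int) + 1 →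
    0 ≤ newtonGo x fuel r ∧ newtonGo x fuel r * newtonGo x fuel r ≤ x ∧
      x < (newtonGo x fuel r + 1) * (newtonGo x fuel r + 1) := by
  intro fuel
  induction fuel with
  | zero =>
    intro r hr hub hf
    have hr1 : r = 1 := by omega
    rw [newtonGo]
    subst hr1
    exact ⟨by omega, by omega, hub⟩
  | succ f ih =>
    intro r hr hub hf
    have hfacts := newton_t_facts x r hx hr
    rw [newtonGo]
    by_cases hlt : PySem.Int.floordiv (r + PySem.Int.floordiv x r) 2 < r
    · rw [if_pos hlt]
      exact ih _ hfacts.1 hfacts.2.1 (by push_cast at hf ⊢; omega)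
    · rw [if_neg hlt]
      refine ⟨by omega, ?_, hub⟩
      by_contra hgt
      push_neg at hgt
      have := hfacts.2.2 hgt
      omega

-- uniqueness of the integer square root characterisation
theorem isqrt_unique (x a b : Int) (ha0 : 0 ≤ a) (hb0 : 0 ≤ b)
    (ha1 : a * a ≤ x) (ha2 : x < (a + 1) * (a + 1))
    (hb1 : b * b ≤ x) (hb2 : x < (b + 1) * (b + 1)) : a = b := by
  by_contra hne
  rcases lt_or_gt_of_ne hne with h | h
  · nlinarith
  · nlinarith

-- the two floor(m*phi) computations agree for m ≥ 1
theorem floor_phi_agree (m : Int) (hm : 1 ≤ m) :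
    PySem.Int.floordiv (m + isqrtB (5 * m * m)) 2 = floor_phi m := by
  have hx : (1:Int) ≤ 5 * m * m := by nlinarith
  have hxe : ¬ (5 * m * m = 0) := by omega
  have hne : ¬ m = 0 := by omega
  have hA := fs5Loop_spec m (3 * m).toNat 0 (3 * m) le_rfl (by omega) (by nlinarith)
    (by nlinarith) (by omega)
  have hB := newtonGo_spec (5 * m * m) hx (5 * m * m).toNat (5 * m * m) hx
    (by nlinarith) (by omega)
  have heq : newtonGo (5 * m * m) (5 * m * m).toNat (5 * m * m) = fs5Loop m (3 * m).toNat 0 (3 * m) :=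
    isqrt_unique (5 * m * m) _ _ hB.1 hA.1 hB.2.1 hB.2.2 hA.2.1 hA.2.2
  unfold floor_phi
  rw [show floor_sqrt5_times_n m = fs5Loop m (3 * m).toNat 0 (3 * m) by
        simp [floor_sqrt5_times_n, hne]]
  rw [show isqrtB (5 * m * m) = newtonGo (5 * m * m) (5 * m * m).toNat (5 * m * m) by
        simp [isqrtB, hxe]]
  rw [heq]

-- key decrease fact for B's descent loop
theorem alt_J_lt (m : Int) (hm : 1 ≤ m) :
    PySem.Int.floordiv (m + isqrtB (5 * m * m)) 2 - m < m := by
  rw [floor_phi_agree m hm]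
  exact floor_phi_sub_lt m hm

-- B's fuel is irrelevant once it exceeds m
theorem framesGo_congr : ∀ (f1 f2 : Nat) (m : Int), m.toNat < f1 → m.toNat < f2 →
    framesGo f1 m = framesGo f2 m := by
  intro f1
  induction f1 with
  | zero => intro f2 m h1; omega
  | succ g1 ih =>
    intro f2 m h1 h2
    match f2, h2 with
    | g2 + 1, _ =>
      rw [framesGo, framesGo]
      by_cases hm : m > 0
      · have hJ : PySem.Int.floordiv (m + isqrtB (5 * m * m)) 2 - m < m := alt_J_lt m (by omega)
        have hih : framesGo g1 (PySem.Int.floordiv (m + isqrtB (5 * m * m)) 2 - m) =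
            framesGo g2 (PySem.Int.floordiv (m + isqrtB (5 * m * m)) 2 - m) :=
          ih g2 _ (by omega) (by omega)
        simp only [if_pos hm, hih]
      · rw [if_neg hm, if_neg hm]

theorem alt_eq_main : ∀ (k : Nat) (n : Int), n.toNat = k → get_suv_alt n = get_suv n := by
  intro k
  induction k using Nat.strong_induction_on with
  | _ k ih =>
    intro n hk
    by_cases hn : n ≤ 0
    · rw [get_suv_alt, get_suv]
      have h1 : n.toNat + 1 = 1 := by omega
      rw [h1, framesGo, suvGo]
      simp [hn, not_lt.mpr hn]
    · have hpos : 0 < n := by omega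
      have hJ : floor_phi n - n < n := floor_phi_sub_lt n (by omega)
      have hrec : get_suv_alt (floor_phi n - n) = get_suv (floor_phi n - n) := by
        exact ih (floor_phi n - n).toNat (by omega) _ rfl
      have hfr : framesGo n.toNat (floor_phi n - n) =
          framesGo ((floor_phi n - n).toNat + 1) (floor_phi n - n) :=
        framesGo_congr n.toNat ((floor_phi n - n).toNat + 1) (floor_phi n - n)
          (by omega) (by omega)
      have hsg : suvGo n.toNat (floor_phi n - n) =
          suvGo ((floor_phi n - n).toNat + 1) (floor_phi n - n) :=
        suvGo_congr n.toNat ((floor_phi n - n).toNat + 1) (floor_phi n - n)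
          (by omega) (by omega)
      rw [get_suv_alt, get_suv, framesGo, suvGo]
      simp only [if_pos hpos, if_neg hn, floor_phi_agree n (by omega), hfr]
      rw [List.reverse_cons, List.foldl_append]
      rw [show (((framesGo ((floor_phi n - n).toNat + 1) (floor_phi n - n)).reverse).foldl
            suvStep (0, 0, 0)) = get_suv_alt (floor_phi n - n) from rfl, hrec]
      rw [get_suv, hsg]
      rfl

-- ===== VERDICT (by name: the statement is the Claim_ definition above) =====
theorem get_suv_spec : Claim_equal_get_suv := by
  intro n _
  unfold Spec_get_suv
  exact (alt_eq_main n.toNat n rfl).symm
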